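-- pv_equiv track=rewrite | github.com/betagouv/diagbruit.beta.gouv.fr | fastapi/app/algorithm/diagnostic.py | filter_land_intersections_by_codeinfra
-- ===== SOURCE A (Python) =====
-- def filter_land_intersections_by_codeinfra(intersections):
--     filtered = {}
--
--     for item in intersections:
--         codeinfra = item.get('codeinfra')
--         legende = item.get('legende')
--
--         if codeinfra not in filtered or legende > filtered[codeinfra]['legende']:
--             filtered[codeinfra] = item
--
--     results = list(filtered.values())
--     codeinfra_not_null = [item for item in results if item.get('codeinfra') is not None]
--
--     if codeinfra_not_null:
--         return codeinfra_not_null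
--     elif results:
--         return [results[0]]
--     else:
--         return []
-- ===== SOURCE B (Python) =====
-- def filter_land_intersections_by_codeinfra(intersections):
--     groups = {}
--     for item in intersections:
--         groups.setdefault(item.get('codeinfra'), []).append(item)
--
--     results = [max(group, key=lambda it: it.get('legende')) for group in groups.values()]
--     codeinfra_not_null = [item for item in results if item.get('codeinfra') is not None]
--
--     if codeinfra_not_null:
--         return codeinfra_not_null
--     if results:
--         return [results[0]]
--     return []
-- ===== Notes on version B (the rewrite author's own statement) =====
-- stated objective: idiomatic
-- what changed: Instead of maintaining a running best-item dict with an explicit strict-'>' comparison, B first groups all items by codeinfra (setdefault+append, preserving first-appearance key order) and then reduces each group with max(group, key=...), which keeps the first maximal item and so matches A's tie-breaking; the same null-filter tail follows.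
import Mathlib
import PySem

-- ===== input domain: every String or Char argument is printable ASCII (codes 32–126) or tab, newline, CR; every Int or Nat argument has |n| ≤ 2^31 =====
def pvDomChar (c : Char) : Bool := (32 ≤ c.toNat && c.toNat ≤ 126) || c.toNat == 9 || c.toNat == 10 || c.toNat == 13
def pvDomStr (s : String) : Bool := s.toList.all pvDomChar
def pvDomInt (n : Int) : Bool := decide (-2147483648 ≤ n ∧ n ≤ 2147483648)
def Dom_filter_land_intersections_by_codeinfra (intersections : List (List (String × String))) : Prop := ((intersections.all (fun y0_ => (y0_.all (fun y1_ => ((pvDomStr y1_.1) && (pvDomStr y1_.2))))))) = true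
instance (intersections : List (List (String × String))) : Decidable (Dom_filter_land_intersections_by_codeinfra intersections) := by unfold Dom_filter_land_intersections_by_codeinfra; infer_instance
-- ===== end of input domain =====

-- B groups items by codeinfra first and then reduces each group with a first-maximal max-by-legende,
-- where A keeps a running best item per codeinfra; same return value (idiomatic decomposition, no speed claim).

-- ===== PORT A =====
-- body of A's for-loop (one step of the running-best dict update)
-- 'if codeinfra not in filtered or legende > filtered[codeinfra]["legende"]' (short-circuit 'or' as nested branches);
-- the '>' is exact when both operands are strings; where a side is missing Python raises TypeError/KeyError — excluded by Pre_
def pvStepA (filtered : PySem.Dict (Option String) (List (String × String))) (item : List (String × String)) : PySem.Dict (Option String) (List (String × String)) :=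
  if ¬ (filtered.contains ((PySem.Dict.mk item).get? "codeinfra")) then
    filtered.insert ((PySem.Dict.mk item).get? "codeinfra") item
  else match (PySem.Dict.mk item).get? "legende",
             (filtered.get? ((PySem.Dict.mk item).get? "codeinfra")).bind (fun prev => (PySem.Dict.mk prev).get? "legende") with
    | some l, some p => if p < l then filtered.insert ((PySem.Dict.mk item).get? "codeinfra") item else filtered
    | _, _ => filtered

def filter_land_intersections_by_codeinfra (intersections : List (List (String × String))) : List (List (String × String)) :=
  let filtered := intersections.foldl pvStepA PySem.Dict.empty
  let results := PySem.Dict.values filtered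
  let codeinfra_not_null := results.filter (fun item => (PySem.Dict.get? (PySem.Dict.mk item) "codeinfra").isSome)
  if codeinfra_not_null ≠ [] then codeinfra_not_null
  else match results with
    | r :: _ => [r]
    | [] => []

-- ===== PORT B =====
-- hand port of max(group, key=lambda it: it.get('legende')): keeps the FIRST maximal element; the key comparison is
-- exact when both keys are strings (Python raises TypeError on a None key there — excluded by Pre_); [] for an empty
-- group is unreachable (every group is built non-empty)
def pyMaxByLeg (group : List (List (String × String))) : List (String × String) :=
  match group with
  | [] => []
  | h :: t => t.foldl (fun best it =>
      match PySem.Dict.get? (PySem.Dict.mk it) "legende", PySem.Dict.get? (PySem.Dict.mk best) "legende" with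
      | some l, some p => if p < l then it else best
      | _, _ => best) h

-- body of B's grouping loop: groups.setdefault(item.get('codeinfra'), []).append(item)
def pvStepB (groups : PySem.Dict (Option String) (List (List (String × String)))) (item : List (String × String)) : PySem.Dict (Option String) (List (List (String × String))) :=
  PySem.Dict.modify groups (PySem.Dict.get? (PySem.Dict.mk item) "codeinfra") [] (fun g => g ++ [item])

def filter_land_intersections_by_codeinfra_alt (intersections : List (List (String × String))) : List (List (String × String)) :=
  let groups := intersections.foldl pvStepB PySem.Dict.empty
  let results := (PySem.Dict.values groups).map pyMaxByLeg
  let codeinfra_not_null := results.filter (fun item => (PySem.Dict.get? (PySem.Dict.mk item) "codeinfra").isSome)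
  if codeinfra_not_null ≠ [] then codeinfra_not_null
  else match results with
    | r :: _ => [r]
    | [] => []

-- ===== PRECONDITION & SPEC =====
-- Pre_ excludes exactly the inputs where Python A raises (TypeError/KeyError): an item without a 'legende' key whose
-- codeinfra group has two or more members forces the '>' comparison against None / a missing key.
def Pre_filter_land_intersections_by_codeinfra (intersections : List (List (String × String))) : Prop :=
  ∀ item ∈ intersections, PySem.Dict.get? (PySem.Dict.mk item) "legende" = none →
    intersections.countP (fun y => PySem.Dict.get? (PySem.Dict.mk y) "codeinfra" == PySem.Dict.get? (PySem.Dict.mk item) "codeinfra") ≤ 1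
instance (intersections : List (List (String × String))) : Decidable (Pre_filter_land_intersections_by_codeinfra intersections) := by unfold Pre_filter_land_intersections_by_codeinfra; infer_instance

def pvWitness_filter_land_intersections_by_codeinfra : (List (List (String × String))) :=
  [[("codeinfra", "A"), ("legende", "1")], [("codeinfra", "A"), ("legende", "2")], [("legende", "0")]]

def Spec_filter_land_intersections_by_codeinfra (intersections : List (List (String × String))) (out : List (List (String × String))) : Prop := out = filter_land_intersections_by_codeinfra_alt intersections
instance (intersections : List (List (String × String))) (out : List (List (String × String))) : Decidable (Spec_filter_land_intersections_by_codeinfra intersections out) := by unfold Spec_filter_land_intersections_by_codeinfra; infer_instance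

-- ===== CLAIM (what is proved, stated in full; the proofs are below) =====
def Claim_equal_filter_land_intersections_by_codeinfra : Prop := ∀ (intersections : List (List (String × String))), Dom_filter_land_intersections_by_codeinfra intersections → Pre_filter_land_intersections_by_codeinfra intersections → Spec_filter_land_intersections_by_codeinfra intersections (filter_land_intersections_by_codeinfra intersections)

-- ===== LEMMAS AND PROOFS =====

-- proof-only: map a groups-dict to the corresponding best-item dict
def pvRed (d : PySem.Dict (Option String) (List (List (String × String)))) : PySem.Dict (Option String) (List (String × String)) :=
  PySem.Dict.mk (d.items.map (fun p => (p.1, pyMaxByLeg p.2)))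


theorem pvRed_get? (d : PySem.Dict (Option String) (List (List (String × String)))) (k : Option String) :
    (pvRed d).get? k = (d.get? k).map pyMaxByLeg := by
  simp [pvRed, PySem.Dict.get?, List.find?_map, Function.comp_def]

theorem pvRed_contains (d : PySem.Dict (Option String) (List (List (String × String)))) (k : Option String) :
    (pvRed d).contains k = d.contains k := by
  simp [pvRed, PySem.Dict.contains, List.any_map, Function.comp_def]

theorem pvRed_insert (d : PySem.Dict (Option String) (List (List (String × String)))) (k : Option String) (v : List (List (String × String))) :
    pvRed (d.insert k v) = (pvRed d).insert k (pyMaxByLeg v) := by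
  unfold PySem.Dict.insert
  rw [pvRed_contains]
  by_cases hc : d.contains k = true
  · simp only [hc, if_pos, pvRed, List.map_map]
    congr 1
    apply List.map_congr_left
    intro p _
    by_cases hp : p.1 = k
    · simp [hp]
    · simp [hp]
  · simp [hc, pvRed]

theorem pv_contains_false_get? {ν : Type} (d : PySem.Dict (Option String) ν) (k : Option String)
    (h : d.contains k = false) : d.get? k = none := by
  unfold PySem.Dict.contains at h
  unfold PySem.Dict.get?
  rw [List.any_eq_false] at h
  rw [List.find?_eq_none.mpr (by intro x hx; exact h x hx)]
  rfl

theorem pv_get?_none_contains {ν : Type} (d : PySem.Dict (Option String) ν) (k : Option String)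
    (h : d.get? k = none) : d.contains k = false := by
  unfold PySem.Dict.get? at h
  unfold PySem.Dict.contains
  rw [Option.map_eq_none_iff, List.find?_eq_none] at h
  rw [List.any_eq_false]
  exact h

theorem pv_map_if_id {ν : Type} (l : List (Option String × ν)) (k : Option String) (v : ν)
    (hnd : l.Pairwise (fun p q => p.1 ≠ q.1))
    (hf : Option.map (fun p => p.2) (l.find? (fun p => p.1 == k)) = some v) :
    l.map (fun p => if p.1 == k then (k, v) else p) = l := by
  induction l with
  | nil => simp at hf
  | cons h t ih =>
    by_cases hb : (h.1 == k) = true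
    · rw [show List.find? (fun p => (p.1 : Option String) == k) (h :: t) = some h from List.find?_cons_of_pos hb] at hf
      simp only [Option.map_some, Option.some.injEq] at hf
      have hk : h.1 = k := eq_of_beq hb
      have ht : ∀ q ∈ t, ((q.1 : Option String) == k) = false := by
        intro q hq
        have hne := (List.pairwise_cons.mp hnd).1 q hq
        rw [hk] at hne
        exact beq_eq_false_iff_ne.mpr (Ne.symm hne)
      simp only [List.map_cons, hb, if_pos]
      refine congrArg₂ List.cons ?_ ?_
      · rw [← hk, ← hf]
      · calc t.map (fun p => if (p.1 == k) = true then (k, v) else p)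
            = t.map id := List.map_congr_left (by intro q hq; simp [ht q hq])
          _ = t := List.map_id t
    · rw [show List.find? (fun p => (p.1 : Option String) == k) (h :: t) = List.find? (fun p => p.1 == k) t from List.find?_cons_of_neg hb] at hf
      simp only [List.map_cons, hb, if_neg, Bool.false_eq_true, not_false_iff]
      rw [ih (List.pairwise_cons.mp hnd).2 hf]

theorem pv_insert_self {ν : Type} (d : PySem.Dict (Option String) ν) (k : Option String) (v : ν)
    (hnd : d.items.Pairwise (fun p q => p.1 ≠ q.1)) (hget : d.get? k = some v) :
    d.insert k v = d := by
  have hcont : d.contains k = true := by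
    unfold PySem.Dict.get? at hget
    unfold PySem.Dict.contains
    rw [List.any_eq_true]
    rcases Option.map_eq_some_iff.mp hget with ⟨pr, hpr, _⟩
    have hb := List.find?_some hpr
    exact ⟨pr, List.mem_of_find?_eq_some hpr, hb⟩
  unfold PySem.Dict.insert
  rw [hcont, if_pos rfl]
  cases d with
  | mk l => exact congrArg PySem.Dict.mk (pv_map_if_id l k v hnd hget)

-- keys of pvRed d are the keys of d
theorem pvRed_pairwise (d : PySem.Dict (Option String) (List (List (String × String))))
    (hnd : d.items.Pairwise (fun p q => p.1 ≠ q.1)) :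
    (pvRed d).items.Pairwise (fun p q => p.1 ≠ q.1) := by
  simp only [pvRed, List.pairwise_map]
  exact hnd

def pvBest (best it : List (String × String)) : List (String × String) :=
  match PySem.Dict.get? (PySem.Dict.mk it) "legende", PySem.Dict.get? (PySem.Dict.mk best) "legende" with
  | some l, some p => if p < l then it else best
  | _, _ => best

theorem pyMaxByLeg_cons (h : List (String × String)) (t : List (List (String × String))) :
    pyMaxByLeg (h :: t) = t.foldl (fun best it => pvBest best it) h := rfl

theorem pyMaxByLeg_append (g : List (List (String × String))) (x : List (String × String)) (hg : g ≠ []) :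
    pyMaxByLeg (g ++ [x]) = pvBest (pyMaxByLeg g) x := by
  cases g with
  | nil => exact absurd rfl hg
  | cons h t => rw [List.cons_append, pyMaxByLeg_cons, List.foldl_concat, ← pyMaxByLeg_cons]

-- one step commutes
theorem pv_step (d : PySem.Dict (Option String) (List (List (String × String)))) (x : List (String × String))
    (hnd : d.items.Pairwise (fun p q => p.1 ≠ q.1)) (hne : ∀ p ∈ d.items, p.2 ≠ []) :
    pvStepA (pvRed d) x = pvRed (pvStepB d x) := by
  unfold pvStepB PySem.Dict.modify
  rw [pvRed_insert]
  unfold pvStepA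
  cases hg : d.get? ((PySem.Dict.mk x).get? "codeinfra") with
  | none =>
    have hc := pv_get?_none_contains d _ hg
    have hgd : d.getD ((PySem.Dict.mk x).get? "codeinfra") [] = [] := by
      unfold PySem.Dict.getD; rw [hg]; rfl
    rw [hgd, pvRed_contains, hc]
    simp only [List.nil_append, Bool.false_eq_true, not_false_iff, if_pos]
    rfl
  | some g =>
    have hc : d.contains ((PySem.Dict.mk x).get? "codeinfra") = true := by
      by_contra hcc
      rw [Bool.not_eq_true] at hcc
      rw [pv_contains_false_get? d _ hcc] at hg
      simp at hg
    have hgne : g ≠ [] := by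
      unfold PySem.Dict.get? at hg
      rcases Option.map_eq_some_iff.mp hg with ⟨pr, hpr, hpr2⟩
      exact hpr2 ▸ hne pr (List.mem_of_find?_eq_some hpr)
    have hgd : d.getD ((PySem.Dict.mk x).get? "codeinfra") [] = g := by
      unfold PySem.Dict.getD; rw [hg]; rfl
    rw [hgd, pvRed_contains, hc, pyMaxByLeg_append g x hgne]
    unfold pvBest
    simp only [not_true, not_false_iff, if_neg]
    rw [pvRed_get?, hg]
    simp only [Option.map_some, Option.bind_some]
    have hself : (pvRed d).insert ((PySem.Dict.mk x).get? "codeinfra") (pyMaxByLeg g) = pvRed d := by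
      apply pv_insert_self _ _ _ (pvRed_pairwise d hnd)
      rw [pvRed_get?, hg]; rfl
    cases hl : (PySem.Dict.mk x).get? "legende" with
    | none =>
      cases hp : (PySem.Dict.mk (pyMaxByLeg g)).get? "legende" <;> simp [hself]
    | some l =>
      cases hp : (PySem.Dict.mk (pyMaxByLeg g)).get? "legende" with
      | none => simp [hself]
      | some p =>
        by_cases hlt : p < l
        · simp [hlt]
        · simp [hlt, hself]

-- invariants are preserved by one grouping step
theorem pv_inv_step (d : PySem.Dict (Option String) (List (List (String × String)))) (x : List (String × String))
    (hnd : d.items.Pairwise (fun p q => p.1 ≠ q.1)) (hne : ∀ p ∈ d.items, p.2 ≠ []) :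
    (pvStepB d x).items.Pairwise (fun p q => p.1 ≠ q.1) ∧ ∀ p ∈ (pvStepB d x).items, p.2 ≠ [] := by
  unfold pvStepB PySem.Dict.modify PySem.Dict.insert
  by_cases hc : d.contains ((PySem.Dict.mk x).get? "codeinfra") = true
  · rw [if_pos hc]
    constructor
    · simp only [List.pairwise_map]
      refine hnd.imp_of_mem ?_
      intro p q _ _ hne'
      by_cases hbp : p.1 = (PySem.Dict.mk x).get? "codeinfra"
      · by_cases hbq : q.1 = (PySem.Dict.mk x).get? "codeinfra"
        · exact absurd (hbp.trans hbq.symm) hne'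
        · simp only [hbp, hbq, beq_iff_eq, beq_self_eq_true, if_true, ite_false]
          exact fun he => hbq he.symm
      · by_cases hbq : q.1 = (PySem.Dict.mk x).get? "codeinfra"
        · simp only [hbp, hbq, beq_iff_eq, beq_self_eq_true, if_true, ite_false]
          exact fun he => hbp (hbq ▸ he)
        · simp only [beq_iff_eq, hbp, hbq, ite_false]
          exact hne'
    · intro p hp
      simp only [List.mem_map] at hp
      rcases hp with ⟨q, hq, hpq⟩
      by_cases hb : q.1 = (PySem.Dict.mk x).get? "codeinfra"
      · rw [if_pos (by simp [hb])] at hpq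
        rw [← hpq]
        simp
      · rw [if_neg (by simp [hb])] at hpq
        exact hpq ▸ hne q hq
  · rw [if_neg hc]
    rw [Bool.not_eq_true] at hc
    have hx : ∀ p ∈ d.items, p.1 ≠ (PySem.Dict.mk x).get? "codeinfra" := by
      intro p hp
      unfold PySem.Dict.contains at hc
      rw [List.any_eq_false] at hc
      exact fun he => by simpa [he] using hc p hp
    constructor
    · rw [List.pairwise_append]
      exact ⟨hnd, List.pairwise_singleton _ _, by
        intro p hp q hq
        simp only [List.mem_singleton] at hq
        rw [hq]
        exact hx p hp⟩
    · intro p hp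
      simp only [List.mem_append, List.mem_singleton] at hp
      rcases hp with hp | hp
      · exact hne p hp
      · rw [hp]; simp

theorem pv_fold (xs : List (List (String × String))) :
    ∀ d, d.items.Pairwise (fun p q => p.1 ≠ q.1) → (∀ p ∈ d.items, p.2 ≠ []) →
      xs.foldl pvStepA (pvRed d) = pvRed (xs.foldl pvStepB d) := by
  induction xs with
  | nil => intro d _ _; rfl
  | cons x t ih =>
    intro d hnd hne
    rw [List.foldl_cons, List.foldl_cons, pv_step d x hnd hne,
        ih _ (pv_inv_step d x hnd hne).1 (pv_inv_step d x hnd hne).2]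

theorem pvRed_values (d : PySem.Dict (Option String) (List (List (String × String)))) :
    (pvRed d).values = d.values.map pyMaxByLeg := by
  simp [pvRed, PySem.Dict.values, List.map_map, Function.comp_def]

theorem pv_main : ∀ (xs : List (List (String × String))),
    filter_land_intersections_by_codeinfra xs = filter_land_intersections_by_codeinfra_alt xs := by
  intro xs
  have h : xs.foldl pvStepA PySem.Dict.empty = pvRed (xs.foldl pvStepB PySem.Dict.empty) :=
    pv_fold xs PySem.Dict.empty (by simp [PySem.Dict.empty])
      (by simp [PySem.Dict.empty])
  unfold filter_land_intersections_by_codeinfra filter_land_intersections_by_codeinfra_alt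
  simp only [h, pvRed_values]

-- ===== VERDICT (by name: the statement is the Claim_ definition above) =====
theorem filter_land_intersections_by_codeinfra_spec : Claim_equal_filter_land_intersections_by_codeinfra := by
  intro xs _ _
  exact pv_main xs
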